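-- pv_equiv track=rewrite | github.com/Pimboto/VideoLab | apps/api/services/processing_service.py | _build_unique_jobs
-- ===== SOURCE A (Python) =====
-- from typing import List, Optional
--
-- def _build_unique_jobs(
--     vids: List[str], auds: List[str], rows_used: List[List[str]], want: int
-- ) -> List[tuple]:
--     """
--     Build unique deterministic jobs.
--
--     Args:
--         vids: List of S3 keys to videos
--         auds: List of S3 keys to audios
--         rows_used: List of text segment combinations
--         want: Number of unique jobs to generate
--
--     Returns:
--         List of tuples: (video_s3_key, audio_s3_key or None, segments, idx)
--     """
--     V = len(vids)
--     C = max(1, len(rows_used))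
--     A = len(auds) if auds else 1
--
--     if V == 0:
--         return []
--
--     total_possible = V * C * A
--     N = min(want, total_possible)
--     picks_per_video = [0] * V
--     jobs = []
--
--     for t in range(N):
--         b = t % V
--         k = picks_per_video[b]
--         picks_per_video[b] += 1
--
--         start_c = b % C
--         cap_idx = (start_c + k) % C
--
--         if auds:
--             start_a = b % A
--             aud_idx = (start_a + k) % A
--             apath = auds[aud_idx]
--         else:
--             apath = None
--
--         vpath = vids[b]
--         segments = rows_used[cap_idx] if C > 0 else []
--         jobs.append((vpath, apath, segments, cap_idx))
--
--     return jobs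
-- ===== SOURCE B (Python) =====
-- from typing import List, Optional
--
--
-- def _build_unique_jobs(
--     vids: List[str], auds: List[str], rows_used: List[List[str]], want: int
-- ) -> List[tuple]:
--     """Staged rewrite: build each video's job stream independently (video-major),
--     then interleave the streams round-robin (a transpose pass).
--
--     Correct because A emits jobs round-robin over the videos, and the k-th job
--     of video b is fully determined by (b, k); video b contributes
--     N//V (+1 for the first N%V videos) jobs in total.
--     """
--     V = len(vids)
--     if V == 0:
--         return []
--     C = max(1, len(rows_used))
--     A = len(auds) if auds else 1
--     N = min(want, V * C * A)
--     if N <= 0: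
--         return []
--     full, extra = divmod(N, V)
--     # stage 1: one independent job stream per video
--     streams = []
--     for b in range(V):
--         cnt = full + (1 if b < extra else 0)
--         stream = []
--         for k in range(cnt):
--             cap_idx = (b % C + k) % C
--             apath = auds[(b % A + k) % A] if auds else None
--             stream.append((vids[b], apath, rows_used[cap_idx], cap_idx))
--         streams.append(stream)
--     # stage 2: transpose — interleave the streams round-robin
--     jobs = []
--     for k in range(full + (1 if extra else 0)):
--         for s in streams:
--             if k < len(s):
--                 jobs.append(s[k])
--     return jobs
-- ===== Notes on version B (the rewrite author's own statement) =====
-- stated objective: alternative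
-- what changed: Instead of A's single flat loop over job indices with a mutable picks_per_video counter array, B first builds one independent job stream per video (video-major pass, pick count k explicit), then a second transpose pass interleaves the streams round-robin into the output order.
import Mathlib
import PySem

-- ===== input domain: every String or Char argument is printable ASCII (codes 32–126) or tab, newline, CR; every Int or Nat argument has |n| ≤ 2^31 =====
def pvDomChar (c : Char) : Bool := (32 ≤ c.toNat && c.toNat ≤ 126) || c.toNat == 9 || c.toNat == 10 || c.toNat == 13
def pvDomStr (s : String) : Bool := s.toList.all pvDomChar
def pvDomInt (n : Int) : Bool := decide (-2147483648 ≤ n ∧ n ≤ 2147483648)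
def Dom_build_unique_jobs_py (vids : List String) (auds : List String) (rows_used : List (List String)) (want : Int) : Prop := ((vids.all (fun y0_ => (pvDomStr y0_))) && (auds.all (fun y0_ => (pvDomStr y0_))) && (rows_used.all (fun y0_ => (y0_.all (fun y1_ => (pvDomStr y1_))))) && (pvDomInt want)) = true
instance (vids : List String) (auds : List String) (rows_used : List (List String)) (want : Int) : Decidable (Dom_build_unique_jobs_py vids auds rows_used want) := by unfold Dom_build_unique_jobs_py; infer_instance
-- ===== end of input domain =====

-- B replaces A's flat job-index loop with its mutable picks_per_video counter array by two staged passes: build one independent job stream per video, then interleave the streams round-robin (a transpose); objective: alternative.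


-- ===== PORT A =====
def build_unique_jobs_py (vids : List String) (auds : List String) (rows_used : List (List String)) (want : Int) : List (String × Option String × List String × Int) :=
  let V : Int := vids.length
  let C : Int := max 1 (rows_used.length : Int)
  let A : Int := if auds.isEmpty then 1 else (auds.length : Int)
  if V = 0 then []
  else
    let N : Int := min want (V * C * A)
    let res := (PySem.List.pyRange 0 N 1).foldl
      (fun (st : List Int × List (String × Option String × List String × Int)) t =>
        let b := PySem.Int.mod t V
        let k := PySem.List.pyGetD st.1 b 0
        let picks := PySem.List.pySetD st.1 b (k + 1)
        let start_c := PySem.Int.mod b C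
        let cap_idx := PySem.Int.mod (start_c + k) C
        let apath : Option String :=
          if auds.isEmpty then none
          else
            let start_a := PySem.Int.mod b A
            let aud_idx := PySem.Int.mod (start_a + k) A
            some (PySem.List.pyGetD auds aud_idx "")
        let vpath := PySem.List.pyGetD vids b ""
        let segments := if C > 0 then PySem.List.pyGetD rows_used cap_idx [] else []
        (picks, st.2 ++ [(vpath, apath, segments, cap_idx)]))
      (List.replicate vids.length (0 : Int), [])
    res.2

-- ===== PORT B =====
-- Source B stage-1 inner loop `for k in range(cnt)`: the independent job stream of video b
def pvStream (vids : List String) (auds : List String) (rows_used : List (List String)) (C A : Int) (b cnt : Int) : List (String × Option String × List String × Int) :=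
  (PySem.List.pyRange 0 cnt 1).foldl
    (fun st k =>
      let cap_idx := PySem.Int.mod (PySem.Int.mod b C + k) C
      let apath : Option String :=
        if auds.isEmpty then none
        else some (PySem.List.pyGetD auds (PySem.Int.mod (PySem.Int.mod b A + k) A) "")
      st ++ [(PySem.List.pyGetD vids b "", apath, PySem.List.pyGetD rows_used cap_idx [], cap_idx)])
    []

def build_unique_jobs_py_alt (vids : List String) (auds : List String) (rows_used : List (List String)) (want : Int) : List (String × Option String × List String × Int) :=
  let V : Int := vids.length
  if V = 0 then []
  else
    let C : Int := max 1 (rows_used.length : Int)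
    let A : Int := if auds.isEmpty then 1 else (auds.length : Int)
    let N : Int := min want (V * C * A)
    if N ≤ 0 then []
    else
      let full := PySem.Int.floordiv N V
      let extra := PySem.Int.mod N V
      -- stage 1: one stream per video
      let streams := (PySem.List.pyRange 0 V 1).foldl
        (fun (acc : List (List (String × Option String × List String × Int))) b =>
          acc ++ [pvStream vids auds rows_used C A b (full + if b < extra then 1 else 0)])
        []
      -- stage 2: transpose — interleave the streams round-robin
      (PySem.List.pyRange 0 (full + if extra ≠ 0 then 1 else 0) 1).foldl
        (fun jobs k =>
          streams.foldl
            (fun jobs s =>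
              if k < (s.length : Int) then jobs ++ [PySem.List.pyGetD s k ("", none, [], 0)]
              else jobs)
            jobs)
        []

-- ===== PRECONDITION & SPEC =====
-- Pre_ excludes exactly the inputs where Python A raises IndexError (rows_used[cap_idx] on empty rows_used once at least one job is built); B raises there too.
def Pre_build_unique_jobs_py (vids : List String) (auds : List String) (rows_used : List (List String)) (want : Int) : Prop :=
  rows_used ≠ [] ∨ vids = [] ∨ want < 1

instance (vids : List String) (auds : List String) (rows_used : List (List String)) (want : Int) : Decidable (Pre_build_unique_jobs_py vids auds rows_used want) := by unfold Pre_build_unique_jobs_py; infer_instance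

def pvWitness_build_unique_jobs_py : List String × List String × List (List String) × Int := (["v1", "v2"], ["a1"], [["s1"], ["s2"]], 5)

def Spec_build_unique_jobs_py (vids : List String) (auds : List String) (rows_used : List (List String)) (want : Int) (out : List (String × Option String × List String × Int)) : Prop := out = build_unique_jobs_py_alt vids auds rows_used want
instance (vids : List String) (auds : List String) (rows_used : List (List String)) (want : Int) (out : List (String × Option String × List String × Int)) : Decidable (Spec_build_unique_jobs_py vids auds rows_used want out) := by unfold Spec_build_unique_jobs_py; infer_instance

-- ===== CLAIM (what is proved, stated in full; the proofs are below) =====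
def Claim_equal_build_unique_jobs_py : Prop := ∀ (vids : List String) (auds : List String) (rows_used : List (List String)) (want : Int), Dom_build_unique_jobs_py vids auds rows_used want → Pre_build_unique_jobs_py vids auds rows_used want → Spec_build_unique_jobs_py vids auds rows_used want (build_unique_jobs_py vids auds rows_used want)

-- ===== LEMMAS AND PROOFS =====

-- the t-th job, t = k*V + b: both programs build exactly this tuple
def pvJob (vids : List String) (auds : List String) (rows_used : List (List String)) (t : Nat) : String × Option String × List String × Int :=
  let V := vids.length
  let C : Nat := max 1 rows_used.length
  let A : Nat := if auds.isEmpty then 1 else auds.length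
  let b := t % V
  let k := t / V
  let cap : Nat := (b % C + k) % C
  (vids.getD b "",
   if auds.isEmpty then none else some (auds.getD ((b % A + k) % A) ""),
   rows_used.getD cap [],
   (cap : Int))

-- the k-th job of video b, in (b, k) coordinates (B's stage-1 view)
def pvJobBK (vids : List String) (auds : List String) (rows_used : List (List String)) (b k : Nat) : String × Option String × List String × Int :=
  let C : Nat := max 1 rows_used.length
  let A : Nat := if auds.isEmpty then 1 else auds.length
  let cap : Nat := (b % C + k) % C
  (vids.getD b "",
   if auds.isEmpty then none else some (auds.getD ((b % A + k) % A) ""),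
   rows_used.getD cap [],
   (cap : Int))

theorem pvJob_eq_BK (vids auds : List String) (rows_used : List (List String)) (b k : Nat) (hb : b < vids.length) :
    pvJob vids auds rows_used (k * vids.length + b) = pvJobBK vids auds rows_used b k := by
  have h1 : (k * vids.length + b) % vids.length = b := by
    rw [Nat.add_comm, Nat.add_mul_mod_self_right, Nat.mod_eq_of_lt hb]
  have h2 : (k * vids.length + b) / vids.length = k := by
    rw [Nat.add_comm, Nat.add_mul_div_right _ _ (by omega : 0 < vids.length), Nat.div_eq_of_lt hb]
    omega
  simp [pvJob, pvJobBK, h1, h2]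

-- picks_per_video after n iterations of A's loop
def pvPicks (V n : Nat) : List Int := (List.range V).map (fun b => (((n / V) + if b < n % V then 1 else 0 : Nat) : Int))
theorem pvPicks_zero (V : Nat) : pvPicks V 0 = List.replicate V 0 := by
  simp [pvPicks]
theorem pvPicks_set (V n : Nat) (hV : 0 < V) :
    (pvPicks V n).set (n % V) ((((n / V) : Nat) : Int) + 1) = pvPicks V (n + 1) := by
  have hlen : ∀ m, (pvPicks V m).length = V := by intro m; simp [pvPicks]
  apply List.ext_getElem
  · simp [pvPicks]
  · intro i h1 h2
    have hi : i < V := by rw [List.length_set, hlen] at h1; exact h1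
    simp only [pvPicks, List.getElem_set, List.getElem_map, List.getElem_range]
    have hsn : n % V < V := Nat.mod_lt _ hV
    have hn : n = V * (n / V) + n % V := (Nat.div_add_mod n V).symm
    rcases Nat.lt_or_ge (n % V + 1) V with hlt | hge
    · have hm : (n+1) % V = n % V + 1 := by
        conv_lhs => rw [hn]
        rw [Nat.add_assoc, Nat.mul_add_mod]
        exact Nat.mod_eq_of_lt hlt
      have hd : (n+1) / V = n / V := by
        conv_lhs => rw [hn]
        rw [Nat.add_assoc, Nat.mul_add_div hV, Nat.div_eq_of_lt hlt]
        omega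
      rw [hm, hd]
      split_ifs <;> push_cast <;> omega
    · have hv : n % V + 1 = V := by omega
      have hm : (n+1) % V = 0 := by
        conv_lhs => rw [hn]
        rw [Nat.add_assoc, Nat.mul_add_mod, hv, Nat.mod_self]
      have hd : (n+1) / V = n / V + 1 := by
        conv_lhs => rw [hn]
        rw [Nat.add_assoc, Nat.mul_add_div hV, hv, Nat.div_self hV]
      rw [hm, hd]
      split_ifs <;> push_cast <;> omega

-- A's loop over job indices 0..n-1 yields the first n spec jobs (invariant: the counter array is pvPicks)
theorem pv_A_loop (vids auds : List String) (rows_used : List (List String)) (hV : vids ≠ []) (n : Nat) :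
    (PySem.List.pyRange 0 (n : Int) 1).foldl
      (fun (st : List Int × List (String × Option String × List String × Int)) t =>
        let b := PySem.Int.mod t (vids.length : Int)
        let k := PySem.List.pyGetD st.1 b 0
        let picks := PySem.List.pySetD st.1 b (k + 1)
        let start_c := PySem.Int.mod b (max 1 (rows_used.length : Int))
        let cap_idx := PySem.Int.mod (start_c + k) (max 1 (rows_used.length : Int))
        let apath : Option String :=
          if auds.isEmpty then none
          else
            let start_a := PySem.Int.mod b (if auds.isEmpty then 1 else (auds.length : Int))
            let aud_idx := PySem.Int.mod (start_a + k) (if auds.isEmpty then 1 else (auds.length : Int))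
            some (PySem.List.pyGetD auds aud_idx "")
        let vpath := PySem.List.pyGetD vids b ""
        let segments := if (max 1 (rows_used.length : Int)) > 0 then PySem.List.pyGetD rows_used cap_idx [] else []
        (picks, st.2 ++ [(vpath, apath, segments, cap_idx)]))
      (List.replicate vids.length (0 : Int), [])
    = (pvPicks vids.length n, (List.range n).map (pvJob vids auds rows_used)) := by
  have hV0 : 0 < vids.length := List.length_pos_of_ne_nil hV
  have hC : (max 1 (rows_used.length:Int)) = ((max 1 rows_used.length : Nat) : Int) := by
    simp [Nat.cast_max]
  have hA : (if auds.isEmpty then 1 else (auds.length:Int)) = ((if auds.isEmpty then 1 else auds.length : Nat) : Int) := by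
    split <;> simp
  induction n with
  | zero => simp [PySem.List.pyRange_one_eq_nil, pvPicks_zero]
  | succ n ih =>
    have hcast : ((n + 1 : Nat) : Int) = (n : Int) + 1 := by push_cast; ring
    rw [hcast, PySem.List.pyRange_one_succ_right (by positivity), List.foldl_append, ih]
    simp only [List.foldl_cons, List.foldl_nil]
    rw [hC, hA]
    have hCpos : (0:Int) < ((max 1 rows_used.length : Nat) : Int) := by positivity
    simp only [PySem.Int.mod_natCast, PySem.List.pyGetD_natCast]
    rw [if_pos hCpos]
    have hk : (pvPicks vids.length n).getD (n % vids.length) 0 = ((n / vids.length : Nat) : Int) := by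
      have h : n % vids.length < vids.length := Nat.mod_lt _ hV0
      simp [pvPicks, List.getD_eq_getElem?_getD, h]
    rw [hk]
    simp only [PySem.List.pySetD_natCast, ← Nat.cast_add, PySem.Int.mod_natCast,
      PySem.List.pyGetD_natCast, Prod.mk.injEq]
    refine ⟨by exact_mod_cast pvPicks_set vids.length n hV0, ?_⟩
    rw [List.range_succ, List.map_append]
    congr 1

-- B's stage-1 inner loop produces exactly the stream of (b,k)-jobs
theorem pvStream_eq (vids auds : List String) (rows_used : List (List String)) (b cnt : Nat) :
    pvStream vids auds rows_used ((max 1 rows_used.length : Nat) : Int) ((if auds.isEmpty then 1 else auds.length : Nat) : Int) (b : Int) (cnt : Int)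
    = (List.range cnt).map (pvJobBK vids auds rows_used b) := by
  induction cnt with
  | zero => simp [pvStream, PySem.List.pyRange_one_eq_nil]
  | succ n ih =>
    unfold pvStream at ih ⊢
    have hcast : ((n + 1 : Nat) : Int) = (n : Int) + 1 := by push_cast; ring
    rw [hcast, PySem.List.pyRange_one_succ_right (by positivity), List.foldl_append, ih]
    simp only [List.foldl_cons, List.foldl_nil]
    simp only [PySem.Int.mod_natCast, ← Nat.cast_add, PySem.Int.mod_natCast,
      PySem.List.pyGetD_natCast]
    rw [List.range_succ, List.map_append]
    congr 1

-- generic: folding "append one element" over a list is a map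
theorem pv_foldl_app {α β : Type} (l : List α) (f : α → β) :
    ∀ (init : List β), l.foldl (fun acc x => acc ++ [f x]) init = init ++ l.map f := by
  induction l with
  | nil => intro init; simp
  | cons x tl ih => intro init; simp [ih]

-- the per-video job count: video j gets jobs exactly while k*V + j < N
theorem pv_cnt_iff (V full extra k j : Nat) (hj : j < V) (hex : extra < V) :
    k * V + j < full * V + extra ↔ k < full + (if j < extra then 1 else 0) := by
  split_ifs with hje
  · constructor
    · intro h
      by_contra hk
      push_neg at hk
      have h2 : (full + 1) * V ≤ k * V := Nat.mul_le_mul_right V hk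
      rw [Nat.add_mul, Nat.one_mul] at h2
      omega
    · intro hk
      have h2 : k * V ≤ full * V := Nat.mul_le_mul_right V (by omega)
      omega
  · constructor
    · intro h
      by_contra hk
      push_neg at hk
      have h2 : full * V ≤ k * V := Nat.mul_le_mul_right V hk
      omega
    · intro hk
      have h2 : (k + 1) * V ≤ full * V := Nat.mul_le_mul_right V (by omega)
      rw [Nat.add_mul, Nat.one_mul] at h2
      omega

-- B's stage-2 inner loop (one pass over the streams, round k): extends the first
-- min(k*V+j, N) jobs to the first min(k*V+V, N) jobs, starting at stream j
theorem pv_B_inner (vids auds : List String) (rows_used : List (List String)) (full extra n k : Nat)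
    (hV : vids ≠ []) (hn : n = full * vids.length + extra) (hex : extra < vids.length) :
    ∀ (tl : List (List (String × Option String × List String × Int))) (j : Nat), j ≤ vids.length →
    tl = (((List.range vids.length).map (fun b => (List.range (full + if b < extra then 1 else 0)).map (pvJobBK vids auds rows_used b)))).drop j →
    tl.foldl
      (fun jobs s =>
        if (k : Int) < (s.length : Int) then jobs ++ [PySem.List.pyGetD s (k : Int) ("", none, [], 0)]
        else jobs)
      ((List.range (min (k * vids.length + j) n)).map (pvJob vids auds rows_used))
    = (List.range (min (k * vids.length + vids.length) n)).map (pvJob vids auds rows_used) := by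
  have hV0 : 0 < vids.length := List.length_pos_of_ne_nil hV
  intro tl
  induction tl with
  | nil =>
    intro j hj hdrop
    have hlen := congrArg List.length hdrop
    simp at hlen
    have hje : j = vids.length := by omega
    subst hje
    simp
  | cons s tl' ih =>
    intro j hj hdrop
    have hlen := congrArg List.length hdrop
    simp at hlen
    have hjlt : j < vids.length := by omega
    rw [List.drop_eq_getElem_cons (by simpa using hjlt)] at hdrop
    obtain ⟨hs, htl⟩ := List.cons.inj hdrop
    rw [List.getElem_map, List.getElem_range] at hs
    rw [List.foldl_cons]
    have hslen : s.length = full + if j < extra then 1 else 0 := by rw [hs]; simp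
    have hcond : ((k : Int) < (s.length : Int)) ↔ (k * vids.length + j < n) := by
      rw [hslen, hn]
      constructor
      · intro h
        exact (pv_cnt_iff vids.length full extra k j hjlt hex).mpr (by exact_mod_cast h)
      · intro h
        exact_mod_cast (pv_cnt_iff vids.length full extra k j hjlt hex).mp h
    have hstep :
        (if (k : Int) < (s.length : Int) then
          ((List.range (min (k * vids.length + j) n)).map (pvJob vids auds rows_used)) ++ [PySem.List.pyGetD s (k : Int) ("", none, [], 0)]
         else ((List.range (min (k * vids.length + j) n)).map (pvJob vids auds rows_used)))
        = (List.range (min (k * vids.length + (j + 1)) n)).map (pvJob vids auds rows_used) := by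
      rcases Nat.lt_or_ge (k * vids.length + j) n with hlt | hge
      · rw [if_pos (hcond.mpr hlt)]
        have hkcnt : k < full + (if j < extra then 1 else 0) := by
          rw [← pv_cnt_iff vids.length full extra k j hjlt hex, ← hn]; exact hlt
        have hget : PySem.List.pyGetD s (k : Int) ("", none, [], 0) = pvJobBK vids auds rows_used j k := by
          rw [PySem.List.pyGetD_natCast, hs]
          rw [List.getD_eq_getElem?_getD]
          simp [hkcnt]
        rw [hget, Nat.min_eq_left (Nat.le_of_lt hlt), Nat.min_eq_left (by omega)]
        have hsucc : k * vids.length + (j + 1) = (k * vids.length + j) + 1 := by omega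
        rw [hsucc, List.range_succ, List.map_append]
        congr 1
        simp only [List.map_cons, List.map_nil]
        rw [pvJob_eq_BK vids auds rows_used j k hjlt]
      · rw [if_neg (fun hc => absurd (hcond.mp hc) (by omega)), Nat.min_eq_right hge, Nat.min_eq_right (by omega)]
    rw [hstep]
    exact ih (j + 1) (by omega) htl

-- B's stage-2 outer loop over rounds 0..m-1
theorem pv_B_outer (vids auds : List String) (rows_used : List (List String)) (full extra n : Nat)
    (hV : vids ≠ []) (hn : n = full * vids.length + extra) (hex : extra < vids.length) (m : Nat) :
    (PySem.List.pyRange 0 (m : Int) 1).foldl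
      (fun jobs k =>
        (((List.range vids.length).map (fun b => (List.range (full + if b < extra then 1 else 0)).map (pvJobBK vids auds rows_used b)))).foldl
          (fun jobs s =>
            if k < (s.length : Int) then jobs ++ [PySem.List.pyGetD s k ("", none, [], 0)]
            else jobs)
          jobs)
      []
    = (List.range (min (m * vids.length) n)).map (pvJob vids auds rows_used) := by
  induction m with
  | zero => simp [PySem.List.pyRange_one_eq_nil]
  | succ m ih =>
    have hcast : ((m + 1 : Nat) : Int) = (m : Int) + 1 := by push_cast; ring
    rw [hcast, PySem.List.pyRange_one_succ_right (by positivity), List.foldl_append, ih]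
    simp only [List.foldl_cons, List.foldl_nil]
    have h := pv_B_inner vids auds rows_used full extra n m hV hn hex
      ((((List.range vids.length).map (fun b => (List.range (full + if b < extra then 1 else 0)).map (pvJobBK vids auds rows_used b)))))
      0 (by omega) (by simp)
    rw [Nat.add_zero] at h
    rw [h]
    congr 2
    ring

theorem pv_main (vids auds : List String) (rows_used : List (List String)) (want : Int) :
    build_unique_jobs_py vids auds rows_used want = build_unique_jobs_py_alt vids auds rows_used want := by
  by_cases hv : vids = []
  · simp [build_unique_jobs_py, build_unique_jobs_py_alt, hv]
  · have hV0 : 0 < vids.length := List.length_pos_of_ne_nil hv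
    have hVne : ¬((vids.length : Int) = 0) := by exact_mod_cast Nat.pos_iff_ne_zero.mp hV0
    simp only [build_unique_jobs_py, build_unique_jobs_py_alt, if_neg hVne]
    set N : Int := min want ((vids.length : Int) * (max 1 (rows_used.length : Int)) * (if auds.isEmpty then 1 else (auds.length : Int))) with hN
    rcases le_or_gt N 0 with hle | hpos
    · rw [PySem.List.pyRange_one_eq_nil (by omega), if_pos hle]
      rfl
    · rw [if_neg (not_le.mpr hpos)]
      set n : Nat := N.toNat with hnn
      have hNn : N = ((n : Nat) : Int) := (Int.toNat_of_nonneg (by omega)).symm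
      rw [hNn]
      simp only [pv_A_loop vids auds rows_used hv n]
      -- B side: identify full / extra / the streams / the transpose
      have hfull : PySem.Int.floordiv ((n : Nat) : Int) ((vids.length : Nat) : Int) = ((n / vids.length : Nat) : Int) :=
        PySem.Int.floordiv_natCast n vids.length
      have hextra : PySem.Int.mod ((n : Nat) : Int) ((vids.length : Nat) : Int) = ((n % vids.length : Nat) : Int) :=
        PySem.Int.mod_natCast n vids.length
      have hC : (max 1 (rows_used.length:Int)) = ((max 1 rows_used.length : Nat) : Int) := by
        simp [Nat.cast_max]
      have hA : (if auds.isEmpty then 1 else (auds.length:Int)) = ((if auds.isEmpty then 1 else auds.length : Nat) : Int) := by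
        split <;> simp
      rw [hfull, hextra, hC, hA]
      set fullN : Nat := n / vids.length with hfullN
      set extraN : Nat := n % vids.length with hextraN
      have hex : extraN < vids.length := Nat.mod_lt _ hV0
      have hsplit : n = fullN * vids.length + extraN := by
        rw [hfullN, hextraN, Nat.mul_comm]
        exact (Nat.div_add_mod n vids.length).symm
      -- the stage-1 fold: streams list
      have hcnt : ∀ b : Nat, ((fullN : Int) + if (b : Int) < (extraN : Int) then 1 else 0)
          = (((fullN + if b < extraN then 1 else 0 : Nat)) : Int) := by
        intro b
        split_ifs with h1 h2 h2 <;> push_cast <;> omega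
      have hstreams : (PySem.List.pyRange 0 ((vids.length : Nat) : Int) 1).foldl
          (fun (acc : List (List (String × Option String × List String × Int))) b =>
            acc ++ [pvStream vids auds rows_used ((max 1 rows_used.length : Nat) : Int) ((if auds.isEmpty then 1 else auds.length : Nat) : Int) b ((fullN : Int) + if b < (extraN : Int) then 1 else 0)])
          []
          = (List.range vids.length).map (fun b => (List.range (fullN + if b < extraN then 1 else 0)).map (pvJobBK vids auds rows_used b)) := by
        rw [pv_foldl_app]
        rw [PySem.List.pyRange_one]
        simp only [Int.sub_zero, Int.toNat_natCast, List.map_map, List.nil_append]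
        apply List.map_congr_left
        intro b _
        simp only [Function.comp_apply, Int.zero_add]
        rw [hcnt b, pvStream_eq]
      rw [hstreams]
      -- rounds count
      have hrounds : ((fullN : Int) + if ((extraN : Nat) : Int) ≠ 0 then 1 else 0)
          = (((fullN + if extraN ≠ 0 then 1 else 0 : Nat)) : Int) := by
        by_cases h : extraN = 0
        · simp [h]
        · have h' : ((extraN : Nat) : Int) ≠ 0 := by exact_mod_cast h
          rw [if_pos h', if_pos h]
          push_cast
          ring
      rw [hrounds]
      set roundsN : Nat := fullN + if extraN ≠ 0 then 1 else 0 with hroundsN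
      rw [pv_B_outer vids auds rows_used fullN extraN n hv hsplit hex roundsN]
      congr 1
      rw [Nat.min_eq_right]
      rw [hroundsN]
      split_ifs with he
      · rw [Nat.add_mul, Nat.one_mul]; omega
      · rw [Nat.add_zero]; omega

-- ===== VERDICT (by name: the statement is the Claim_ definition above) =====
theorem build_unique_jobs_py_spec : Claim_equal_build_unique_jobs_py := by
  intro vids auds rows_used want _ _
  unfold Spec_build_unique_jobs_py
  exact pv_main vids auds rows_used want
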